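-- pv_equiv track=rewrite | github.com/elektxo/DAM_22-23 | PRO/ut03/guia-ejercicios/ejercicio05.py | mayor_alza
-- ===== SOURCE A (Python) =====
-- def mayor_alza(cotizaciones):
--     mayor=cotizaciones[0]
--     for i in cotizaciones:
--         if i >= mayor:
--             mayor=i
--     if cotizaciones.count(mayor) > 1:
--         resultado='No hay un alza'
--     else:
--         for i in range(len(cotizaciones)):
--             if mayor == cotizaciones[i]:
--                 resultado=f'El dia de mayor alza fue {i+1} con un alza de {cotizaciones[i]}'
--     return resultado
-- ===== SOURCE B (Python) =====
-- def mayor_alza(cotizaciones):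
--     mayor = cotizaciones[0]
--     idx = 0
--     dup = False
--     j = 1
--     for v in cotizaciones[1:]:
--         if v > mayor:
--             mayor = v
--             idx = j
--             dup = False
--         elif v == mayor:
--             dup = True
--         j += 1
--     if dup:
--         return 'No hay un alza'
--     return f'El dia de mayor alza fue {idx + 1} con un alza de {mayor}'
-- ===== Notes on version B (the rewrite author's own statement) =====
-- stated objective: alternative
-- what changed: A scans the list three times (a max fold, a full .count, and an index loop over range(len)); B makes a single pass carrying (running max, its first index, duplicate flag) and formats the answer from that state.
import Mathlib
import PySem

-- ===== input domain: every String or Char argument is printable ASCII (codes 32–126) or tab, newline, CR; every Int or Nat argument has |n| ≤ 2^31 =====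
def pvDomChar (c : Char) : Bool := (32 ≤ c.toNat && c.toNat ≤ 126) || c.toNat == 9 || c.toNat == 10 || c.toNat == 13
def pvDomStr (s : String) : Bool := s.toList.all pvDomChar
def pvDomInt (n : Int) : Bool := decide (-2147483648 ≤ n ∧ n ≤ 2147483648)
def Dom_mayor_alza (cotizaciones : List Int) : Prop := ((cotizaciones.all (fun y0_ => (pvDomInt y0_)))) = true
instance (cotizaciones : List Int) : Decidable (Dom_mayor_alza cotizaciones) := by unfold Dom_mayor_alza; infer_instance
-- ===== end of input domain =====

-- B replaces A's three scans (max-fold, count, index loop) by ONE pass tracking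
-- (running max, its first index, a duplicate flag); same return value on nonempty lists.

-- ===== PORT A =====
-- literal transliteration of A; the empty-list branch is where A raises IndexError, excluded by Pre_
def mayor_alza (cotizaciones : List Int) : String :=
  match cotizaciones with
  | [] => ""
  | c0 :: _ =>
    let mayor := cotizaciones.foldl (fun m i => if i ≥ m then i else m) c0
    if PySem.List.count cotizaciones mayor > 1 then
      "No hay un alza"
    else
      -- for i in range(len(..)): indices are always in range, so pyGetD is exact here
      (PySem.List.pyRange 0 (PySem.List.len cotizaciones) 1).foldl
        (fun res i =>
          if mayor = PySem.List.pyGetD cotizaciones i 0 then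
            "El dia de mayor alza fue " ++ PySem.Int.toStr (i + 1) ++
              " con un alza de " ++ PySem.Int.toStr (PySem.List.pyGetD cotizaciones i 0)
          else res) ""

-- ===== PORT B =====
-- one step of B's single loop: state (mayor, idx, dup, j)
def altStep (s : Int × Int × Bool × Int) (v : Int) : Int × Int × Bool × Int :=
  if v > s.1 then (v, s.2.2.2, false, s.2.2.2 + 1)
  else if v = s.1 then (s.1, s.2.1, true, s.2.2.2 + 1)
  else (s.1, s.2.1, s.2.2.1, s.2.2.2 + 1)

def mayor_alza_alt (cotizaciones : List Int) : String :=
  match cotizaciones with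
  | [] => ""
  | c0 :: rest =>
    let s := rest.foldl altStep (c0, 0, false, 1)
    if s.2.2.1 then "No hay un alza"
    else "El dia de mayor alza fue " ++ PySem.Int.toStr (s.2.1 + 1) ++
      " con un alza de " ++ PySem.Int.toStr s.1

-- ===== PRECONDITION & SPEC =====
-- A starts by reading the first element: the empty list raises IndexError, so it is excluded.
def Pre_mayor_alza (cotizaciones : List Int) : Prop := cotizaciones ≠ []
instance (cotizaciones : List Int) : Decidable (Pre_mayor_alza cotizaciones) := by
  unfold Pre_mayor_alza; infer_instance
def pvWitness_mayor_alza : List Int := [3, 7, 2]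

def Spec_mayor_alza (cotizaciones : List Int) (out : String) : Prop := out = mayor_alza_alt cotizaciones
instance (cotizaciones : List Int) (out : String) : Decidable (Spec_mayor_alza cotizaciones out) := by
  unfold Spec_mayor_alza; infer_instance

-- ===== CLAIM (what is proved, stated in full; the proofs are below) =====
def Claim_equal_mayor_alza : Prop := ∀ (cotizaciones : List Int), Dom_mayor_alza cotizaciones → Pre_mayor_alza cotizaciones → Spec_mayor_alza cotizaciones (mayor_alza cotizaciones)

-- ===== LEMMAS AND PROOFS =====

-- A's first loop computes foldl max
lemma a_max_eq (c0 : Int) (l : List Int) :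
    l.foldl (fun m i => if i ≥ m then i else m) c0 = l.foldl max c0 := by
  have h : (fun (m i : Int) => if i ≥ m then i else m) = max := by
    funext m i
    simp only [ge_iff_le, max_def]
  rw [h]

lemma le_foldl_max (m : Int) (l : List Int) : m ≤ l.foldl max m := by
  induction l generalizing m with
  | nil => simp
  | cons v t ih => exact le_trans (le_max_left m v) (ih (max m v))

lemma foldl_max_mem (m : Int) (l : List Int) : l.foldl max m = m ∨ l.foldl max m ∈ l := by
  induction l generalizing m with
  | nil => left; rfl
  | cons v t ih =>
    simp only [List.foldl_cons]
    rcases ih (max m v) with h | h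
    · rcases max_choice m v with h' | h'
      · left; rw [h, h']
      · right; rw [h, h']; exact List.mem_cons_self
    · right; exact List.mem_cons_of_mem v h

-- characterization of B's single pass
lemma alt_fold_char (l : List Int) : ∀ (m idx : Int) (dup : Bool) (j : Int),
    l.foldl altStep (m, idx, dup, j) =
      (l.foldl max m,
       if m < l.foldl max m then j + (List.idxOf (l.foldl max m) l : Int) else idx,
       if m < l.foldl max m then decide (1 < List.count (l.foldl max m) l) else (dup || decide (m ∈ l)),
       j + l.length) := by
  induction l with
  | nil => intro m idx dup j; simp
  | cons v t ih =>
    intro m idx dup j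
    simp only [List.foldl_cons]
    by_cases hv : v > m
    · have hmax : max m v = v := by omega
      simp only [hmax]
      have hstep : altStep (m, idx, dup, j) v = (v, j, false, j + 1) := by
        simp [altStep, hv]
      rw [hstep, ih]
      have hTv : v ≤ t.foldl max v := le_foldl_max v t
      have hm : m < t.foldl max v := by omega
      simp only [Prod.mk.injEq]
      refine ⟨by trivial, ?_, ?_, ?_⟩
      · rw [if_pos hm]
        by_cases hgt : v < t.foldl max v
        · have hne : v ≠ t.foldl max v := by omega
          rw [if_pos hgt, List.idxOf_cons_ne _ hne]
          push_cast; ring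
        · have hTeq : t.foldl max v = v := by omega
          rw [if_neg hgt, hTeq, List.idxOf_cons_self]
          simp
      · rw [if_pos hm]
        by_cases hgt : v < t.foldl max v
        · have hne : v ≠ t.foldl max v := by omega
          rw [if_pos hgt, List.count_cons_of_ne (show v ≠ t.foldl max v by omega)]
        · have hTeq : t.foldl max v = v := by omega
          rw [if_neg hgt, hTeq, List.count_cons_self]
          simp only [Bool.false_or, decide_eq_decide]
          constructor
          · intro h
            have := List.count_pos_iff.mpr h
            omega
          · intro h
            exact List.count_pos_iff.mp (by omega)
      · simp only [List.length_cons]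
        push_cast; ring
    · by_cases heq : v = m
      · subst heq
        have hmax : max v v = v := max_self v
        simp only [hmax]
        have hstep : altStep (v, idx, dup, j) v = (v, idx, true, j + 1) := by
          simp [altStep, hv]
        rw [hstep, ih]
        simp only [Prod.mk.injEq]
        refine ⟨by trivial, ?_, ?_, ?_⟩
        · by_cases hgt : v < t.foldl max v
          · have hne : v ≠ t.foldl max v := by omega
            rw [if_pos hgt, if_pos hgt, List.idxOf_cons_ne _ hne]
            push_cast; ring
          · rw [if_neg hgt, if_neg hgt]
        · by_cases hgt : v < t.foldl max v
          · have hne : v ≠ t.foldl max v := by omega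
            rw [if_pos hgt, if_pos hgt, List.count_cons_of_ne (show v ≠ t.foldl max v by omega)]
          · rw [if_neg hgt, if_neg hgt]
            simp
        · simp only [List.length_cons]
          push_cast; ring
      · have hlt : v < m := by omega
        have hmax : max m v = m := by omega
        simp only [hmax]
        have hstep : altStep (m, idx, dup, j) v = (m, idx, dup, j + 1) := by
          simp [altStep, hv, heq]
        rw [hstep, ih]
        simp only [Prod.mk.injEq]
        refine ⟨by trivial, ?_, ?_, ?_⟩
        · by_cases hgt : m < t.foldl max m
          · have hne : v ≠ t.foldl max m := by omega
            rw [if_pos hgt, if_pos hgt, List.idxOf_cons_ne _ hne]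
            push_cast; ring
          · rw [if_neg hgt, if_neg hgt]
        · by_cases hgt : m < t.foldl max m
          · have hne : v ≠ t.foldl max m := by omega
            rw [if_pos hgt, if_pos hgt, List.count_cons_of_ne (show v ≠ t.foldl max m by omega)]
          · rw [if_neg hgt, if_neg hgt]
            have hmm : decide (m = v ∨ m ∈ t) = decide (m ∈ t) := by
              simp only [decide_eq_decide]
              constructor
              · rintro (h | h)
                · exact absurd h.symm heq
                · exact h
              · exact Or.inr
            simp only [List.mem_cons, hmm]
        · simp only [List.length_cons]
          push_cast; ring

-- A's index loop, rewritten over enumerate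
lemma a_loop_enum (xs : List Int) (M : Int) (init : String) :
    (PySem.List.pyRange 0 (PySem.List.len xs) 1).foldl
      (fun res i =>
        if M = PySem.List.pyGetD xs i 0 then
          "El dia de mayor alza fue " ++ PySem.Int.toStr (i + 1) ++
            " con un alza de " ++ PySem.Int.toStr (PySem.List.pyGetD xs i 0)
        else res) init
    = (PySem.List.enumerate xs).foldl
        (fun res p =>
          if M = p.2 then
            "El dia de mayor alza fue " ++ PySem.Int.toStr (p.1 + 1) ++
              " con un alza de " ++ PySem.Int.toStr p.2
          else res) init := by
  rw [PySem.List.enumerate_eq_map_pyRange xs 0, List.foldl_map]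

lemma loop_not_mem (M : Int) (l : List Int) : ∀ (s : Int) (init : String), M ∉ l →
    (PySem.List.enumerate l s).foldl
      (fun res p =>
        if M = p.2 then
          "El dia de mayor alza fue " ++ PySem.Int.toStr (p.1 + 1) ++
            " con un alza de " ++ PySem.Int.toStr p.2
        else res) init = init := by
  induction l with
  | nil => intro s init _; rfl
  | cons v t ih =>
    intro s init h
    rw [PySem.List.enumerate_cons]
    simp only [List.mem_cons, not_or] at h
    simp only [List.foldl_cons]
    rw [if_neg h.1, ih (s + 1) init h.2]

lemma loop_unique (M : Int) (l : List Int) : ∀ (s : Int) (init : String), List.count M l = 1 →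
    (PySem.List.enumerate l s).foldl
      (fun res p =>
        if M = p.2 then
          "El dia de mayor alza fue " ++ PySem.Int.toStr (p.1 + 1) ++
            " con un alza de " ++ PySem.Int.toStr p.2
        else res) init
    = "El dia de mayor alza fue " ++ PySem.Int.toStr (s + (List.idxOf M l : Int) + 1) ++
        " con un alza de " ++ PySem.Int.toStr M := by
  induction l with
  | nil => intro s init h; simp at h
  | cons v t ih =>
    intro s init h
    rw [PySem.List.enumerate_cons]
    simp only [List.foldl_cons]
    by_cases hv : M = v
    · subst hv
      rw [if_pos rfl]
      rw [List.count_cons_self] at h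
      have ht : M ∉ t := by
        rw [← List.count_eq_zero]; omega
      rw [loop_not_mem M t (s + 1) _ ht]
      rw [List.idxOf_cons_self]
      push_cast
      ring_nf
    · rw [if_neg hv]
      rw [List.count_cons_of_ne (fun h' => hv h'.symm)] at h
      rw [ih (s + 1) init h]
      rw [List.idxOf_cons_ne _ (fun h' => hv h'.symm)]
      push_cast
      ring_nf

-- count bridge
lemma pysem_count_eq (xs : List Int) (v : Int) :
    PySem.List.count xs v = List.count v xs := PySem.List.count_eq xs v

-- ===== VERDICT (by name: the statement is the Claim_ definition above) =====
theorem mayor_alza_spec : Claim_equal_mayor_alza := by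
  intro cotizaciones _ hpre
  unfold Spec_mayor_alza
  match cotizaciones with
  | [] => exact absurd rfl hpre
  | c0 :: rest =>
    simp only [mayor_alza, mayor_alza_alt]
    rw [a_max_eq]
    rw [alt_fold_char rest c0 0 false 1]
    have hM' : (c0 :: rest).foldl max c0 = rest.foldl max c0 := by
      simp only [List.foldl_cons, max_self]
    set M := rest.foldl max c0 with hMdef
    have hc0 : c0 ≤ M := le_foldl_max c0 rest
    rw [hM']
    by_cases hgt : c0 < M
    · have hne : c0 ≠ M := by omega
      have hcnt : List.count M (c0 :: rest) = List.count M rest := by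
        rw [List.count_cons_of_ne hne]
      simp only [pysem_count_eq, hcnt, if_pos hgt]
      by_cases hdup : 1 < List.count M rest
      · rw [if_pos hdup, if_pos (by simp [hdup])]
      · rw [if_neg hdup, if_neg (by simp [hdup])]
        have hmem : M ∈ rest := by
          rcases foldl_max_mem c0 rest with h | h
          · exact absurd h hne.symm
          · exact h
        have hcnt1 : List.count M (c0 :: rest) = 1 := by
          rw [hcnt]
          have := List.count_pos_iff.mpr hmem
          omega
        rw [a_loop_enum, loop_unique M (c0 :: rest) 0 "" hcnt1]
        rw [List.idxOf_cons_ne _ hne]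
        push_cast
        ring_nf
    · have heq : M = c0 := by omega
      rw [if_neg hgt]
      have hcnt : List.count M (c0 :: rest) = List.count M rest + 1 := by
        rw [heq, List.count_cons_self]
      simp only [pysem_count_eq, hcnt]
      by_cases hmem : c0 ∈ rest
      · rw [if_pos (by
          have : 0 < List.count M rest := by rw [heq]; exact List.count_pos_iff.mpr hmem
          omega), if_pos (by simp [hgt, hmem])]
      · have hc : List.count M rest = 0 := by
          rw [heq, List.count_eq_zero]; exact hmem
        rw [if_neg (by omega), if_neg (by simp [hgt, hmem])]
        rw [a_loop_enum, loop_unique M (c0 :: rest) 0 "" (by omega)]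
        rw [heq, List.idxOf_cons_self]
        norm_num
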